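-- pv_equiv track=rewrite | github.com/goldenstein64/DailyInterviewPro | solutions/_2026/_02_february/_09_list_can_pick_two.py | can_pick_two
-- ===== SOURCE A (Python) =====
-- def can_pick_two(nums: list[int]) -> bool:
--     """
--     Given a list of positive integers, determine whether there exist two indexes
--     such that the three partitions around them sum up to the same value.
--
--     This has worst case O(n^2) time and O(n) space, best case O(n) time and O(n)
--     space.
--     """
--     n: int = len(nums)
--     if n == 2:  # no elements in all partitions
--         return True
--     elif n < 5:
--         # Having less than 5 elements means there must be at least one partition
--         # with no elements, which means every element would have to be equal to
--         # zero. That's impossible since every integer must be positive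
--         return False
--
--     # minimal non-trivial case: [left_sum, i, middle_sum, j, right_sum]
--
--     left_sum: int = nums[0]  # sum(nums[:i])
--     right_starting_sum: int = sum(nums[4:])
--     for i in range(1, n - 3):
--         if left_sum > right_starting_sum:
--             break
--
--         middle_sum: int = nums[i + 1]  # sum(nums[i+1:j])
--         right_sum: int = right_starting_sum  # sum(nums[j+1:])
--
--         for j in range(i + 2, n - 1):
--             if left_sum == middle_sum == right_sum:
--                 return True
--             elif middle_sum > left_sum or middle_sum > right_sum:
--                 break
--
--             middle_sum += nums[j]
--             right_sum -= nums[j + 1]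
--
--         left_sum += nums[i]
--         right_starting_sum -= nums[i + 3]
--
--     return False
-- ===== SOURCE B (Python) =====
-- def can_pick_two(nums: list[int]) -> bool:
--     """Two-pointer sweep over prefix/suffix sums (single pass; valid for
--     the function's documented domain of positive integers)."""
--     n = len(nums)
--     if n == 2:
--         return True
--     if n < 5:
--         return False
--     total = sum(nums)
--     i, j = 1, n - 2
--     left, right = nums[0], nums[n - 1]
--     while i + 2 <= j:
--         if left < right:
--             left += nums[i]
--             i += 1
--         elif right < left:
--             right += nums[j]
--             j -= 1
--         else:
--             middle = total - left - right - nums[i] - nums[j]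
--             if middle == left:
--                 return True
--             if middle < left:
--                 return False
--             left += nums[i]
--             i += 1
--     return False
-- ===== Notes on version B (the rewrite author's own statement) =====
-- stated objective: alternative
-- what changed: A's nested scan (outer split index with an inner scan re-walking the middle/right sums for every outer step) is replaced by a single two-pointer sweep that keeps running prefix and suffix sums and moves whichever pointer has the smaller sum inward, so each element is visited once.
-- outside the precondition, e.g. on can_pick_two([-2, 4, -2, -3, -3, 1, -2, 2]): A returns True, B returns False
import Mathlib
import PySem

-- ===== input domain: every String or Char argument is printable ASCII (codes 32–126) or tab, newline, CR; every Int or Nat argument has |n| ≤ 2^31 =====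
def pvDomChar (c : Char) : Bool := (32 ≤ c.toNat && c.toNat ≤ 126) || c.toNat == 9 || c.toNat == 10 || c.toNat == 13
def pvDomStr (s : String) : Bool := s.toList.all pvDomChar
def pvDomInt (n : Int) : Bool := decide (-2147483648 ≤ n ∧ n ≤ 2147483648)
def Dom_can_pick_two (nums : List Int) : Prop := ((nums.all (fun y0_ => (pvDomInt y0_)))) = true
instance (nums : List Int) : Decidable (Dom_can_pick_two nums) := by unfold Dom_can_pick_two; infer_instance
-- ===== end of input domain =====

-- B replaces A's nested scan with a single two-pointer sweep over prefix/suffix sums; on the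
-- function's documented domain (positive integers) both decide the same three-way-split question.

-- ===== PORT A =====
-- inner loop `for j in range(i+2, n-1)`: `steps` counts the remaining iterations; all list
-- indices reached here are provably in range (j+1 ≤ n-1), so `List.getD _ _ 0` equals Python's nums[_].
def aInner (nums : List Int) (left mid right : Int) (j : Nat) (steps : Nat) : Bool :=
  match steps with
  | 0 => false
  | s + 1 =>
    if left = mid ∧ mid = right then true
    else if mid > left ∨ mid > right then false
    else aInner nums left (mid + nums.getD j 0) (right - nums.getD (j + 1) 0) (j + 1) s

-- outer loop `for i in range(1, n-3)`; the inner `return True` surfaces as `aInner … = true`.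
def aOuter (nums : List Int) (n : Nat) (left rstart : Int) (i : Nat) (steps : Nat) : Bool :=
  match steps with
  | 0 => false
  | s + 1 =>
    if left > rstart then false
    else if aInner nums left (nums.getD (i + 1) 0) rstart (i + 2) (n - 1 - (i + 2)) then true
    else aOuter nums n (left + nums.getD i 0) (rstart - nums.getD (i + 3) 0) (i + 1) s

def can_pick_two (nums : List Int) : Bool :=
  let n := nums.length
  if n = 2 then true
  else if n < 5 then false
  else aOuter nums n (nums.getD 0 0) (nums.drop 4).sum 1 (n - 4)

-- ===== PORT B =====
-- the while loop of Source B; each iteration moves one pointer inward, so `fuel = n - 3` iterations suffice.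
def bLoop (nums : List Int) (total left right : Int) (i j : Nat) (fuel : Nat) : Bool :=
  match fuel with
  | 0 => false
  | f + 1 =>
    if i + 2 ≤ j then
      if left < right then bLoop nums total (left + nums.getD i 0) right (i + 1) j f
      else if right < left then bLoop nums total left (right + nums.getD j 0) i (j - 1) f
      else
        let middle := total - left - right - nums.getD i 0 - nums.getD j 0
        if middle = left then true
        else if middle < left then false
        else bLoop nums total (left + nums.getD i 0) right (i + 1) j f
    else false

def can_pick_two_alt (nums : List Int) : Bool :=
  let n := nums.length
  if n = 2 then true
  else if n < 5 then false
  else bLoop nums nums.sum (nums.getD 0 0) (nums.getD (n - 1) 0) 1 (n - 2) (n - 3)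

-- ===== PRECONDITION & SPEC =====
-- Pre_ restricts to the function's documented natural domain ("a list of positive integers"):
-- A's early-break conditions are monotonicity arguments that are sound only for positive entries,
-- so on longer lists with non-positive entries A's value is an artefact of its breaks and B does
-- not reproduce it; lists shorter than 5 are decided by their length alone and are all admitted.
def Pre_can_pick_two (nums : List Int) : Prop :=
  nums.length < 5 ∨ ∀ x ∈ nums, 0 < x
instance (nums : List Int) : Decidable (Pre_can_pick_two nums) := by
  unfold Pre_can_pick_two; infer_instance

def pvWitness_can_pick_two : List Int := [1, 2, 1, 1, 1, 1, 2]

def Spec_can_pick_two (nums : List Int) (out : Bool) : Prop := out = can_pick_two_alt nums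
instance (nums : List Int) (out : Bool) : Decidable (Spec_can_pick_two nums out) := by
  unfold Spec_can_pick_two; infer_instance

-- ===== CLAIM (what is proved, stated in full; the proofs are below) =====
def Claim_equal_can_pick_two : Prop :=
  ∀ (nums : List Int), Dom_can_pick_two nums → Pre_can_pick_two nums →
    Spec_can_pick_two nums (can_pick_two nums)

-- ===== LEMMAS AND PROOFS =====

-- prefix sum: pvP nums k = sum(nums[:k])
def pvP (nums : List Int) (k : Nat) : Int := (nums.take k).sum

-- a valid three-way split at the pair (i, j) (both programs only scan 1 ≤ i, i+2 ≤ j ≤ n-2)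
def pvSol (nums : List Int) (i j : Nat) : Prop :=
  i + 2 ≤ j ∧ j + 2 ≤ nums.length ∧
    pvP nums i = pvP nums j - pvP nums (i + 1) ∧
    pvP nums nums.length - pvP nums (j + 1) = pvP nums i

lemma pvP_succ (nums : List Int) (k : Nat) (h : k < nums.length) :
    pvP nums (k + 1) = pvP nums k + nums.getD k 0 := by
  unfold pvP
  rw [List.sum_take_succ _ _ h, List.getD_eq_getElem _ _ h]

lemma pvP_mono (nums : List Int) (hpos : ∀ x ∈ nums, 0 < x) {a b : Nat} (h : a ≤ b) :
    pvP nums a ≤ pvP nums b := by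
  unfold pvP
  have hsplit : nums.take b = nums.take a ++ (nums.drop a).take (b - a) := by
    rw [← List.take_add]; congr 1; omega
  rw [hsplit, List.sum_append]
  have : 0 ≤ ((nums.drop a).take (b - a)).sum := by
    apply List.sum_nonneg
    intro x hx
    exact le_of_lt (hpos x (List.mem_of_mem_drop (List.mem_of_mem_take hx)))
  omega

lemma pvP_strict (nums : List Int) (hpos : ∀ x ∈ nums, 0 < x) {a b : Nat}
    (h : a < b) (hb : b ≤ nums.length) : pvP nums a < pvP nums b := by
  have ha : a < nums.length := by omega
  have h1 := pvP_succ nums a ha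
  have h2 : 0 < nums.getD a 0 := by
    rw [List.getD_eq_getElem _ _ ha]; exact hpos _ (List.getElem_mem ha)
  have h3 := pvP_mono nums hpos (show a + 1 ≤ b by omega)
  omega

lemma pvP_length (nums : List Int) : pvP nums nums.length = nums.sum := by
  simp [pvP]

lemma aInner_iff (nums : List Int) (hpos : ∀ x ∈ nums, 0 < x) (i j steps : Nat)
    (hij : i + 2 ≤ j) (hj : j ≤ nums.length - 1) (hn : 5 ≤ nums.length)
    (hsteps : steps = nums.length - 1 - j) :
    aInner nums (pvP nums i) (pvP nums j - pvP nums (i + 1))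
        (pvP nums nums.length - pvP nums (j + 1)) j steps = true ↔
      ∃ j', j ≤ j' ∧ pvSol nums i j' := by
  induction steps generalizing j with
  | zero =>
    simp only [aInner, Bool.false_eq_true, false_iff]
    rintro ⟨j', hjj', _, hj'n, _⟩
    omega
  | succ s ih =>
    simp only [aInner]
    split_ifs with h1 h2
    · constructor
      · intro _
        exact ⟨j, le_refl j, hij, by omega, h1.1, by omega⟩
      · intro _; rfl
    · simp only [false_iff]
      rintro ⟨j', hjj', _, hj'n, e1, e2⟩
      have hm := pvP_mono nums hpos hjj'
      have hr := pvP_mono nums hpos (show j + 1 ≤ j' + 1 by omega)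
      rcases h2 with h2 | h2 <;> omega
    · have hs1 := pvP_succ nums j (by omega)
      have hs2 := pvP_succ nums (j + 1) (by omega)
      rw [show pvP nums j - pvP nums (i + 1) + nums.getD j 0
            = pvP nums (j + 1) - pvP nums (i + 1) by omega,
          show pvP nums nums.length - pvP nums (j + 1) - nums.getD (j + 1) 0
            = pvP nums nums.length - pvP nums (j + 1 + 1) by omega]
      rw [ih (j + 1) (by omega) (by omega) (by omega)]
      constructor
      · rintro ⟨j', hjj', hsol⟩
        exact ⟨j', by omega, hsol⟩
      · rintro ⟨j', hjj', hsol⟩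
        refine ⟨j', ?_, hsol⟩
        rcases Nat.eq_or_lt_of_le hjj' with rfl | hlt
        · obtain ⟨_, _, hc, hd⟩ := hsol
          exact absurd ⟨hc, by omega⟩ h1
        · omega

lemma aOuter_iff (nums : List Int) (hpos : ∀ x ∈ nums, 0 < x) (i steps : Nat)
    (hn : 5 ≤ nums.length) (hi2 : i ≤ nums.length - 3)
    (hsteps : steps = nums.length - 3 - i) :
    aOuter nums nums.length (pvP nums i) (pvP nums nums.length - pvP nums (i + 3)) i steps = true ↔
      ∃ i' j, i ≤ i' ∧ pvSol nums i' j := by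
  induction steps generalizing i with
  | zero =>
    simp only [aOuter, Bool.false_eq_true, false_iff]
    rintro ⟨i', j, hii', hij, hjn, _, _⟩
    omega
  | succ s ih =>
    have hi4 : i ≤ nums.length - 4 := by omega
    simp only [aOuter]
    have hmid : pvP nums (i + 2) = pvP nums (i + 1) + nums.getD (i + 1) 0 :=
      pvP_succ nums (i + 1) (by omega)
    split_ifs with h1 h2
    · simp only [false_iff]
      rintro ⟨i', j, hii', hij, hjn, e1, e2⟩
      have hm1 := pvP_mono nums hpos hii'
      have hm2 := pvP_mono nums hpos (show i + 3 ≤ j + 1 by omega)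
      omega
    · rw [show nums.getD (i + 1) 0 = pvP nums (i + 2) - pvP nums (i + 1) by omega] at h2
      rw [aInner_iff nums hpos i (i + 2) _ (by omega) (by omega) hn rfl] at h2
      constructor
      · intro _
        obtain ⟨j', _, hsol⟩ := h2
        exact ⟨i, j', le_refl i, hsol⟩
      · intro _; rfl
    · rw [show nums.getD (i + 1) 0 = pvP nums (i + 2) - pvP nums (i + 1) by omega] at h2
      rw [aInner_iff nums hpos i (i + 2) _ (by omega) (by omega) hn rfl] at h2
      have hs0 := pvP_succ nums i (by omega)
      have hs3 : pvP nums (i + 1 + 3) = pvP nums (i + 3) + nums.getD (i + 3) 0 :=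
        pvP_succ nums (i + 3) (by omega)
      rw [show pvP nums i + nums.getD i 0 = pvP nums (i + 1) by omega,
          show pvP nums nums.length - pvP nums (i + 3) - nums.getD (i + 3) 0
            = pvP nums nums.length - pvP nums (i + 1 + 3) by omega]
      rw [ih (i + 1) (by omega) (by omega)]
      constructor
      · rintro ⟨i', j, hii', hsol⟩
        exact ⟨i', j, by omega, hsol⟩
      · rintro ⟨i', j, hii', hsol⟩
        rcases Nat.eq_or_lt_of_le hii' with rfl | hlt
        · exact absurd ⟨j, hsol.1, hsol⟩ h2
        · exact ⟨i', j, by omega, hsol⟩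

lemma bLoop_sound (nums : List Int) (i j fuel : Nat)
    (hjn : j + 2 ≤ nums.length)
    (h : bLoop nums (pvP nums nums.length) (pvP nums i)
          (pvP nums nums.length - pvP nums (j + 1)) i j fuel = true) :
    ∃ i' j', i ≤ i' ∧ pvSol nums i' j' := by
  induction fuel generalizing i j with
  | zero => simp [bLoop] at h
  | succ f ih =>
    simp only [bLoop] at h
    split_ifs at h with hcond hlr hrl hme hml
    · -- left < right: advance i
      rw [show pvP nums i + nums.getD i 0 = pvP nums (i + 1) from
            (pvP_succ nums i (by omega)).symm] at h
      obtain ⟨i', j', hi, hsol⟩ := ih (i + 1) j hjn h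
      exact ⟨i', j', by omega, hsol⟩
    · -- right < left: advance j
      rw [show pvP nums nums.length - pvP nums (j + 1) + nums.getD j 0
            = pvP nums nums.length - pvP nums (j - 1 + 1) by
          have hs := pvP_succ nums j (by omega)
          have hj1 : j - 1 + 1 = j := by omega
          rw [hj1]; omega] at h
      exact ih i (j - 1) (by omega) h
    · -- middle = left: a solution at (i, j)
      have hs_i := pvP_succ nums i (by omega)
      have hs_j := pvP_succ nums j (by omega)
      exact ⟨i, j, le_refl i, hcond, hjn, by omega, by omega⟩
    · -- middle > left: advance i
      rw [show pvP nums i + nums.getD i 0 = pvP nums (i + 1) from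
            (pvP_succ nums i (by omega)).symm] at h
      obtain ⟨i', j', hi, hsol⟩ := ih (i + 1) j hjn h
      exact ⟨i', j', by omega, hsol⟩

lemma bLoop_complete (nums : List Int) (hpos : ∀ x ∈ nums, 0 < x) (i j fuel i' j' : Nat)
    (hjn : j + 2 ≤ nums.length) (hfuel : j ≤ i + fuel + 1)
    (hii : i ≤ i') (hjj : j' ≤ j) (hsol : pvSol nums i' j') :
    bLoop nums (pvP nums nums.length) (pvP nums i)
        (pvP nums nums.length - pvP nums (j + 1)) i j fuel = true := by
  obtain ⟨hij', hj'n, e1, e2⟩ := hsol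
  induction fuel generalizing i j with
  | zero => omega
  | succ f ih =>
    have hcond : i + 2 ≤ j := by omega
    have hmi := pvP_mono nums hpos hii
    have hmj := pvP_mono nums hpos (show j' + 1 ≤ j + 1 by omega)
    have hs_i := pvP_succ nums i (by omega)
    have hs_j := pvP_succ nums j (by omega)
    simp only [bLoop, if_pos hcond]
    split_ifs with hlr hrl hme hml
    · -- left < right: i < i'
      have hii2 : i < i' := by
        by_contra hc
        push Not at hc
        have := pvP_mono nums hpos hc
        omega
      rw [show pvP nums i + nums.getD i 0 = pvP nums (i + 1) from
            (pvP_succ nums i (by omega)).symm]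
      exact ih (i + 1) j hjn (by omega) (by omega) hjj
    · -- right < left: j' < j
      have hjj2 : j' < j := by
        by_contra hc
        push Not at hc
        have := pvP_mono nums hpos (show j + 1 ≤ j' + 1 by omega)
        omega
      rw [show pvP nums nums.length - pvP nums (j + 1) + nums.getD j 0
            = pvP nums nums.length - pvP nums (j - 1 + 1) by
          have hj1 : j - 1 + 1 = j := by omega
          rw [hj1]; omega]
      exact ih i (j - 1) (by omega) (by omega) hii (by omega)
    · rfl
    · -- middle < left is impossible when a solution lies inside
      exfalso
      have hmj2 := pvP_mono nums hpos (show j' ≤ j by omega)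
      have hmi2 := pvP_mono nums hpos (show i + 1 ≤ i' + 1 by omega)
      omega
    · -- middle > left: i < i'
      have hii2 : i < i' := by
        by_contra hc
        push Not at hc
        have hie : i = i' := by omega
        subst hie
        have hje : j = j' := by
          by_contra hne
          have := pvP_strict nums hpos (show j' + 1 < j + 1 by omega) (by omega)
          omega
        subst hje
        omega
      rw [show pvP nums i + nums.getD i 0 = pvP nums (i + 1) from
            (pvP_succ nums i (by omega)).symm]
      exact ih (i + 1) j hjn (by omega) (by omega) hjj

-- ===== VERDICT (by name: the statement is the Claim_ definition above) =====
theorem can_pick_two_spec : Claim_equal_can_pick_two := by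
  intro nums _ hpre
  unfold Spec_can_pick_two
  simp only [can_pick_two, can_pick_two_alt]
  split_ifs with h2 h5
  · rfl
  · rfl
  · have hn : 5 ≤ nums.length := by omega
    have hpre : ∀ x ∈ nums, 0 < x := by
      rcases hpre with hlen | hpos
      · omega
      · exact hpos
    have hP0 : pvP nums 0 = 0 := by simp [pvP]
    have hs0 : pvP nums 1 = pvP nums 0 + nums.getD 0 0 := pvP_succ nums 0 (by omega)
    have e0 : nums.getD 0 0 = pvP nums 1 := by omega
    have e4 : (nums.drop 4).sum = pvP nums nums.length - pvP nums (1 + 3) := by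
      have hsplit : (nums.take 4).sum + (nums.drop 4).sum = nums.sum := by
        rw [← List.sum_append, List.take_append_drop]
      have h14 : pvP nums (1 + 3) = (nums.take 4).sum := by norm_num [pvP]
      rw [pvP_length]
      omega
    have hsn : pvP nums nums.length
        = pvP nums (nums.length - 1) + nums.getD (nums.length - 1) 0 := by
      have h := pvP_succ nums (nums.length - 1) (by omega)
      rwa [show nums.length - 1 + 1 = nums.length by omega] at h
    have eR : nums.getD (nums.length - 1) 0
        = pvP nums nums.length - pvP nums (nums.length - 2 + 1) := by
      rw [show nums.length - 2 + 1 = nums.length - 1 by omega]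
      omega
    have hA2 := aOuter_iff nums hpre 1 (nums.length - 4) hn (by omega) (by omega)
    rw [← e0, ← e4] at hA2
    have hB2 : bLoop nums nums.sum (nums.getD 0 0) (nums.getD (nums.length - 1) 0) 1
        (nums.length - 2) (nums.length - 3) = true ↔ ∃ i' j, 1 ≤ i' ∧ pvSol nums i' j := by
      rw [show nums.sum = pvP nums nums.length from (pvP_length nums).symm, e0, eR]
      constructor
      · exact bLoop_sound nums 1 (nums.length - 2) (nums.length - 3) (by omega)
      · rintro ⟨i', j', hi1, hsol⟩
        obtain ⟨hij', hj'n, he1, he2⟩ := hsol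
        exact bLoop_complete nums hpre 1 (nums.length - 2) (nums.length - 3) i' j'
          (by omega) (by omega) hi1 (by omega) ⟨hij', hj'n, he1, he2⟩
    rw [Bool.eq_iff_iff, hA2, hB2]
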